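-- pv_equiv track=rewrite | github.com/Toby16/alx-backend | 0x00-pagination/0-simple_helper_function.py | index_range
-- ===== SOURCE A (Python) =====
-- from typing import Tuple
--
-- def index_range(page: int, page_size: int) -> Tuple[int, int]:
--     """
--     Retrieves the index range from a given page and page size
--     """
--     i = 0
--     tuple_value = ()
--
--     value_1 = 0
--     value_2 = page_size
--
--     while i < page:
--         tuple_value = (value_1, value_2)
--         value_1 += page_size
--         value_2 += page_size
--
--         i += 1
--
--     return tuple_value
-- ===== SOURCE B (Python) =====
-- def index_range(page, page_size):
--     """Closed-form index range: O(1) instead of looping page times."""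
--     if page <= 0:
--         return ()
--     return ((page - 1) * page_size, page * page_size)
-- ===== Notes on version B (the rewrite author's own statement) =====
-- stated objective: faster
-- what changed: Replaced the O(page) while-loop that rebuilds the tuple each iteration with the closed form ((page-1)*page_size, page*page_size), returning () when page <= 0 as A does.
import Mathlib
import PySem

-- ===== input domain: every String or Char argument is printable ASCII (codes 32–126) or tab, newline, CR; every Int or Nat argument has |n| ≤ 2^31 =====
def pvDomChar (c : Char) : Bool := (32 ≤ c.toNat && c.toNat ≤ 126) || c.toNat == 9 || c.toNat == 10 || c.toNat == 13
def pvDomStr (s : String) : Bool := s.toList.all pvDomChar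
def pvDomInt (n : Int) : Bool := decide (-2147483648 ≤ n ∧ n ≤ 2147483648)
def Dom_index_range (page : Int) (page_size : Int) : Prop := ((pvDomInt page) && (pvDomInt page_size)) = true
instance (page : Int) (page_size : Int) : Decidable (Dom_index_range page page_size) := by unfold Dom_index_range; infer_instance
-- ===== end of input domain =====

-- B replaces A's O(page) while-loop with the closed form ((page-1)*ps, page*ps); objective: faster (asymptotic).


-- ===== PORT A =====
-- literal port of A's while-loop: state (i, tuple_value, value_1, value_2)
def indexRangeLoop (ps page i v1 v2 : Int) (tv : List Int) : List Int :=
  if i < page then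
    indexRangeLoop ps page (i + 1) (v1 + ps) (v2 + ps) [v1, v2]
  else tv
termination_by (page - i).toNat
decreasing_by omega

def index_range (page : Int) (page_size : Int) : List Int :=
  indexRangeLoop page_size page 0 0 page_size []

-- ===== PORT B =====
def index_range_alt (page : Int) (page_size : Int) : List Int :=
  if page ≤ 0 then []
  else [(page - 1) * page_size, page * page_size]

-- ===== PRECONDITION & SPEC =====
def Spec_index_range (page : Int) (page_size : Int) (out : List Int) : Prop := out = index_range_alt page page_size
instance (page : Int) (page_size : Int) (out : List Int) : Decidable (Spec_index_range page page_size out) := by unfold Spec_index_range; infer_instance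

-- ===== CLAIM (what is proved, stated in full; the proofs are below) =====
def Claim_equal_index_range : Prop := ∀ (page : Int) (page_size : Int), Dom_index_range page page_size → Spec_index_range page page_size (index_range page page_size)

-- ===== LEMMAS AND PROOFS =====
-- Loop invariant: when i < page, the loop returns [v1 + (page-1-i)*ps, v2 + (page-1-i)*ps].
theorem indexRangeLoop_eq (ps page : Int) :
    ∀ (n : Nat) (i v1 v2 : Int) (tv : List Int), (page - i).toNat = n → i < page →
      indexRangeLoop ps page i v1 v2 tv
        = [v1 + (page - 1 - i) * ps, v2 + (page - 1 - i) * ps] := by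
  intro n
  induction n with
  | zero => intro i v1 v2 tv hn hi; omega
  | succ k ih =>
    intro i v1 v2 tv hn hi
    rw [indexRangeLoop, if_pos hi]
    by_cases h : i + 1 < page
    · rw [ih (i + 1) (v1 + ps) (v2 + ps) [v1, v2] (by omega) h]
      simp only [List.cons.injEq, and_true]
      constructor <;> ring
    · have hip : i + 1 = page := by omega
      rw [indexRangeLoop, if_neg (by omega)]
      have : page - 1 - i = 0 := by omega
      simp [this]

theorem index_range_spec : Claim_equal_index_range := by
  intro page ps _
  unfold Spec_index_range index_range index_range_alt
  by_cases h : page ≤ 0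
  · rw [indexRangeLoop, if_neg (by omega), if_pos h]
  · rw [indexRangeLoop_eq ps page (page - 0).toNat 0 0 ps [] rfl (by omega), if_neg h]
    simp only [List.cons.injEq, and_true]
    constructor <;> ring
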